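-- pv_equiv track=rewrite | github.com/PrabhTheCoder/ITI1120 | Datastructures/Q2_300018569.py | find_minimum_loss
-- ===== SOURCE A (Python) =====
-- class MinHeap:
--     def __init__(self,  items=[]):
--         self.heap = [0]
--         for i in items:
--             self.heap.append(i)
--             self.__floatUp(len(self.heap)-1)
--     def push(self, data):
--         """(MinHeap, Object) -> None
--             Pushes data into the heap.
--         """
--         self.heap.append(data)
--         self.__floatUp(len(self.heap)-1)
--
--     def peek(self):
--         """(MinHeap) -> Object
--             Returns the minimum item in the heap
--         """
--         if len(self.heap) > 1:
--             return self.heap[1]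
--         else:
--             return False
--     def pop(self):
--         """(MinHeap) -> Object
--             Returns and removes the minimum object in the heap.
--         """
--         if len(self.heap) > 2:
--             self.__swap(1, len(self.heap)-1) #Swaps last element and min to allow popping in const time
--             minimum = self.heap.pop()
--             self.__minHeapify(1) #Puts everything back where it belongs
--         elif len(self.heap) == 2:
--             minimum = self.heap.pop()
--         else:
--             minimum = False
--         return minimum
--     def __swap(self,i,j):
--         self.heap[i], self.heap[j] = self.heap[j], self.heap[i]
--     def __floatUp(self, index):
--         parent = index // 2
--         #reached top of heap so just return
--         if index <= 1:
--             return
--         #if child is less than parent, swap them and perform same checks on the parent of the parent.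
--         elif self.heap[index] < self.heap[parent]:
--             self.__swap(index, parent)
--             self.__floatUp(parent)
--     def __minHeapify(self, index):
--         left = index * 2 #left child
--         right = index * 2 + 1 #right child
--         smallest = index #initially assumes index is the largest
--
--         #if left child exists, and the current smallest is greater than the left
--         #child set the largest as the left childs index
--         if len(self.heap) > left and self.heap[smallest] > self.heap[left]:
--             smallest = left
--         #if the right child exists, and the current smallest is  greater than
--         #the right child set the largest as the right childs index.
--         if len(self.heap) > right and self.heap[smallest] > self.heap[right]:
--             smallest = right
--         if smallest != index:
--             #if the smallest isnt the current number, swap places with the smallest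
--             #and then perform same operations on the index the current item was
--             #moved to.
--             self.__swap(index, smallest)
--             self.__minHeapify(smallest)
--
-- def find_minimum_loss(a):
--     tmp = MinHeap()
--     for i in range(len(a) - 1):
--         for j in range(i, len(a)):
--             val = a[i]- a[j]
--             if val > 1:
--                 tmp.push(val)
--             elif val == 1:
--                 return 1
--
--
--     if tmp.peek():
--         return tmp.peek()
--     return 0
-- ===== SOURCE B (Python) =====
-- def find_minimum_loss(a):
--     pairs = sorted(enumerate(a), key=lambda p: p[1])
--     best = 0
--     for k in range(1, len(pairs)):
--         i1, v1 = pairs[k - 1]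
--         i2, v2 = pairs[k]
--         if v2 > v1 and i2 < i1:
--             d = v2 - v1
--             if best == 0 or d < best:
--                 best = d
--     return best
-- ===== Notes on version B (the rewrite author's own statement) =====
-- stated objective: faster
-- what changed: Replaced the O(n^2) all-pairs scan feeding a hand-rolled binary min-heap by one stable sort of (index, value) pairs by value followed by a single adjacent-pair scan: the minimum positive loss is always realised by two value-adjacent entries whose indices are inverted.
import Mathlib
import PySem

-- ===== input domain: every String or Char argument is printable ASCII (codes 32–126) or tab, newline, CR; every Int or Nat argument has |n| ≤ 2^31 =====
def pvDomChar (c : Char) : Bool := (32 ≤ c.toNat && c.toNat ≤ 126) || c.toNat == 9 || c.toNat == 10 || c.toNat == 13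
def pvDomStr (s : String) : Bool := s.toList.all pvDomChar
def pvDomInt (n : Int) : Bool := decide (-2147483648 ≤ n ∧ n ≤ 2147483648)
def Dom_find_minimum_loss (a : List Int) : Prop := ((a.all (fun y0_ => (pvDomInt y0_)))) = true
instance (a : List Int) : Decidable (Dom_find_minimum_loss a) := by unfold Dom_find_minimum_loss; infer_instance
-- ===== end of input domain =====

-- B replaces A's all-pairs scan feeding a hand-written binary min-heap by one stable sort of
-- (index, value) pairs by value and a single adjacent-pair scan (objective: faster).

-- ===== PORT A =====
-- A's MinHeap class, restricted to the members find_minimum_loss actually uses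
-- (__init__ with no items, push/__floatUp/__swap, peek; pop/__minHeapify are never called).
-- The heap is a List Int addressed by Nat indices (all of A's heap indices are nonnegative
-- and in range); heap[i] is read with getD, self.heap[i], self.heap[j] = ... with set.
def pvHeapSwap (hp : List Int) (i j : Nat) : List Int :=
  (hp.set i (hp.getD j 0)).set j (hp.getD i 0)

def pvFloatUp (hp : List Int) (index : Nat) : List Int :=
  let parent := index / 2
  if _h1 : index ≤ 1 then hp
  else if hp.getD index 0 < hp.getD parent 0 then
    pvFloatUp (pvHeapSwap hp index parent) parent
  else hp
termination_by index
decreasing_by exact Nat.div_lt_self (by omega) (by omega)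

def pvHeapPush (hp : List Int) (x : Int) : List Int :=
  pvFloatUp (hp ++ [x]) ((hp ++ [x]).length - 1)

-- peek: `some v` is Python's returned heap element, `none` models the returned `False`
def pvHeapPeek (hp : List Int) : Option Int :=
  if hp.length > 1 then some (hp.getD 1 0) else none

-- inner loop `for j in range(i, len(a))`; `none` models the early `return 1`
def pvInnerA (a : List Int) (i : Int) (js : List Int) (hp : List Int) : Option (List Int) :=
  match js with
  | [] => some hp
  | j :: rest =>
    let val := PySem.List.pyGetD a i 0 - PySem.List.pyGetD a j 0
    if 1 < val then pvInnerA a i rest (pvHeapPush hp val)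
    else if val = 1 then none
    else pvInnerA a i rest hp

-- outer loop `for i in range(len(a) - 1)`
def pvOuterA (a : List Int) (is : List Int) (hp : List Int) : Option (List Int) :=
  match is with
  | [] => some hp
  | i :: rest =>
    match pvInnerA a i (PySem.List.pyRange i (a.length : Int) 1) hp with
    | none => none
    | some hp' => pvOuterA a rest hp'

def find_minimum_loss (a : List Int) : Int :=
  match pvOuterA a (PySem.List.pyRange 0 ((a.length : Int) - 1) 1) [0] with
  | none => 1
  | some hp =>
    match pvHeapPeek hp with
    | some v => if v ≠ 0 then v else 0   -- `if tmp.peek(): return tmp.peek()` / `return 0`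
    | none => 0

-- ===== PORT B =====
def find_minimum_loss_alt (a : List Int) : Int :=
  let pairs := PySem.List.sorted (PySem.List.enumerate a) (fun p => p.2) false
  (PySem.List.pyRange 1 (pairs.length : Int) 1).foldl
    (fun best k =>
      let p1 := PySem.List.pyGetD pairs (k - 1) ((0 : Int), (0 : Int))
      let p2 := PySem.List.pyGetD pairs k ((0 : Int), (0 : Int))
      if p2.2 > p1.2 ∧ p2.1 < p1.1 then
        if best = 0 ∨ p2.2 - p1.2 < best then p2.2 - p1.2 else best
      else best) 0

-- ===== PRECONDITION & SPEC =====
def Spec_find_minimum_loss (a : List Int) (out : Int) : Prop := out = find_minimum_loss_alt a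
instance (a : List Int) (out : Int) : Decidable (Spec_find_minimum_loss a out) := by unfold Spec_find_minimum_loss; infer_instance

-- ===== CLAIM (what is proved, stated in full; the proofs are below) =====
def Claim_equal_find_minimum_loss : Prop := ∀ (a : List Int), Dom_find_minimum_loss a → Spec_find_minimum_loss a (find_minimum_loss a)

-- ===== LEMMAS AND PROOFS =====

-- `pvLoss a d`: d is a positive loss of a, i.e. d = a[i] - a[j] ≥ 1 for some i < j.
def pvLoss (a : List Int) (d : Int) : Prop :=
  ∃ i j : Nat, i < j ∧ j < a.length ∧ 1 ≤ d ∧ d = a.getD i 0 - a.getD j 0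

-- `pvMin a r`: r is the minimum positive loss of a, or 0 if there is none.
def pvMin (a : List Int) (r : Int) : Prop :=
  ((¬ ∃ d, pvLoss a d) ∧ r = 0) ∨ (pvLoss a r ∧ ∀ d, pvLoss a d → r ≤ d)

lemma pvMin_unique {a : List Int} {r1 r2 : Int} (h1 : pvMin a r1) (h2 : pvMin a r2) : r1 = r2 := by
  rcases h1 with ⟨hn1, he1⟩ | ⟨hl1, hm1⟩ <;> rcases h2 with ⟨hn2, he2⟩ | ⟨hl2, hm2⟩
  · omega
  · exact absurd ⟨r2, hl2⟩ hn1
  · exact absurd ⟨r1, hl1⟩ hn2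
  · exact le_antisymm (hm1 _ hl2) (hm2 _ hl1)

-- ---------- heap lemmas (A side) ----------

lemma pv_getD_set (l : List Int) (i p : Nat) (v : Int) (hp : p < l.length) :
    (l.set i v).getD p 0 = if i = p then v else l.getD p 0 := by
  rw [List.getD_eq_getElem _ _ (by simpa using hp), List.getElem_set]
  split
  · rfl
  · rw [List.getD_eq_getElem _ _ hp]

lemma pv_perm_core (t : List Int) (x : Int) (m : Nat) (hm : m < t.length) :
    (t[m] :: t.set m x).Perm (x :: t) := by
  have hA : t.take m ++ t[m] :: t.drop (m+1) = t := by
    rw [List.getElem_cons_drop, List.take_append_drop]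
  conv_rhs => rw [← hA]
  rw [List.set_eq_take_append_cons_drop]
  simp only [hm, if_true]
  refine (List.Perm.cons _ List.perm_middle).trans ?_
  refine (List.Perm.swap _ _ _).trans ?_
  exact List.Perm.cons _ List.perm_middle.symm

lemma pv_swap_perm (l : List Int) : ∀ (i j : Nat), i < l.length → j < l.length →
    (pvHeapSwap l i j).Perm l := by
  induction l with
  | nil => intro i j hi hj; simp at hi
  | cons a t ih =>
    intro i j hi hj
    match i, j with
    | 0, 0 => simp [pvHeapSwap]
    | 0, m+1 =>
      have hm : m < t.length := by simpa using hj
      have he : pvHeapSwap (a :: t) 0 (m+1) = t[m] :: t.set m a := by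
        simp [pvHeapSwap, List.getElem?_eq_getElem hm]
      rw [he]; exact pv_perm_core t a m hm
    | n+1, 0 =>
      have hn : n < t.length := by simpa using hi
      have he : pvHeapSwap (a :: t) (n+1) 0 = t[n] :: t.set n a := by
        simp [pvHeapSwap, List.getElem?_eq_getElem hn]
      rw [he]; exact pv_perm_core t a n hn
    | n+1, m+1 =>
      have he : pvHeapSwap (a :: t) (n+1) (m+1) = a :: pvHeapSwap t n m := by
        simp [pvHeapSwap]
      rw [he]
      exact (ih n m (by simpa using hi) (by simpa using hj)).cons a

lemma pv_swap_drop_perm (l : List Int) (i j : Nat) (h1i : 1 ≤ i) (h1j : 1 ≤ j)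
    (hi : i < l.length) (hj : j < l.length) :
    ((pvHeapSwap l i j).drop 1).Perm (l.drop 1) := by
  have hdi : (l.drop 1).getD (i-1) 0 = l.getD i 0 := by
    rw [List.getD_eq_getElem _ _ (by simp; omega), List.getD_eq_getElem _ _ hi, List.getElem_drop]
    congr 1; omega
  have hdj : (l.drop 1).getD (j-1) 0 = l.getD j 0 := by
    rw [List.getD_eq_getElem _ _ (by simp; omega), List.getD_eq_getElem _ _ hj, List.getElem_drop]
    congr 1; omega
  have he : (pvHeapSwap l i j).drop 1 = pvHeapSwap (l.drop 1) (i-1) (j-1) := by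
    simp only [pvHeapSwap, List.drop_set]
    rw [if_neg (by omega), if_neg (by omega), hdi, hdj]
  rw [he]
  exact pv_swap_perm (l.drop 1) (i-1) (j-1) (by simp; omega) (by simp; omega)

lemma pv_floatUp_spec : ∀ (idx : Nat) (hp : List Int), 1 ≤ idx → idx < hp.length →
    (∀ p, 1 ≤ p → p < hp.length → p ≠ idx → hp.getD 1 0 ≤ hp.getD p 0) →
    (pvFloatUp hp idx).length = hp.length ∧
    ((pvFloatUp hp idx).drop 1).Perm (hp.drop 1) ∧
    (pvFloatUp hp idx).getD 1 0 = min (hp.getD 1 0) (hp.getD idx 0) := by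
  intro idx
  induction idx using Nat.strong_induction_on with
  | _ idx ih =>
    intro hp h1 h2 hmin
    rw [pvFloatUp]
    by_cases hc : idx ≤ 1
    · have : idx = 1 := by omega
      subst this
      simp
    · rw [dif_neg hc]
      have hpar1 : 1 ≤ idx / 2 := by omega
      have hparlt : idx / 2 < idx := by omega
      have hparlen : idx / 2 < hp.length := by omega
      set par := idx / 2 with hpardef
      by_cases hlt : hp.getD idx 0 < hp.getD par 0
      · rw [if_pos hlt]
        set g := pvHeapSwap hp idx par with hgdef
        have hglen : g.length = hp.length := by simp [hgdef, pvHeapSwap]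
        have hg : ∀ p, p < hp.length →
            g.getD p 0 = if par = p then hp.getD idx 0
              else if idx = p then hp.getD par 0 else hp.getD p 0 := by
          intro p hplt
          rw [hgdef]
          show ((hp.set idx (hp.getD par 0)).set par (hp.getD idx 0)).getD p 0 = _
          rw [pv_getD_set _ _ _ _ (by simpa using hplt), pv_getD_set _ _ _ _ hplt]
        have hg1 : g.getD 1 0 = if par = 1 then hp.getD idx 0 else hp.getD 1 0 := by
          rw [hg 1 (by omega)]
          by_cases hpq : par = 1
          · rw [if_pos hpq, if_pos hpq]
          · rw [if_neg hpq, if_neg hpq, if_neg (by omega)]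
        have hgpar : g.getD par 0 = hp.getD idx 0 := by
          rw [hg par hparlen, if_pos rfl]
        have hpremise : ∀ p, 1 ≤ p → p < g.length → p ≠ par → g.getD 1 0 ≤ g.getD p 0 := by
          intro p hp1 hp2 hpne
          rw [hglen] at hp2
          rw [hg p hp2, if_neg (by omega), hg1]
          by_cases hpq : par = 1
          · rw [if_pos hpq]
            by_cases hpidx : idx = p
            · rw [if_pos hpidx]; omega
            · rw [if_neg hpidx]
              have := hmin p hp1 hp2 (by omega)
              rw [hpq] at hlt
              omega
          · rw [if_neg hpq]
            by_cases hpidx : idx = p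
            · rw [if_pos hpidx]
              exact hmin par hpar1 hparlen (by omega)
            · rw [if_neg hpidx]
              exact hmin p hp1 hp2 (by omega)
        obtain ⟨l1, l2, l3⟩ := ih par hparlt g hpar1 (by omega) hpremise
        refine ⟨l1.trans hglen, ?_, ?_⟩
        · exact l2.trans (pv_swap_drop_perm hp idx par (by omega) hpar1 h2 hparlen)
        · rw [l3, hgpar, hg1]
          by_cases hpq : par = 1
          · rw [if_pos hpq]
            rw [hpq] at hlt
            omega
          · rw [if_neg hpq]
      · rw [if_neg hlt]
        refine ⟨rfl, List.Perm.refl _, ?_⟩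
        have : hp.getD 1 0 ≤ hp.getD idx 0 := by
          by_cases hpareq : par = 1
          · rw [← hpareq]; omega
          · exact le_trans (hmin par hpar1 hparlen (by omega)) (by omega)
        omega

def pvRootInv (hp : List Int) : Prop := ∀ y ∈ hp.drop 1, hp.getD 1 0 ≤ y

lemma pv_mem_drop_of_getD (hp : List Int) (p : Nat) (h1 : 1 ≤ p) (h2 : p < hp.length) :
    hp.getD p 0 ∈ hp.drop 1 := by
  rw [List.getD_eq_getElem _ _ h2]
  have : hp[p] = (hp.drop 1)[p - 1]'(by simp; omega) := by
    rw [List.getElem_drop]; congr 1; omega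
  rw [this]
  exact List.getElem_mem _

lemma pv_push_spec (hp : List Int) (x : Int) (hl : 1 ≤ hp.length) (hinv : pvRootInv hp) :
    (pvHeapPush hp x).length = hp.length + 1 ∧
    ((pvHeapPush hp x).drop 1).Perm (hp.drop 1 ++ [x]) ∧
    pvRootInv (pvHeapPush hp x) := by
  have hlen' : (hp ++ [x]).length = hp.length + 1 := by simp
  have hidx : (hp ++ [x]).length - 1 = hp.length := by simp
  have hgetin : ∀ p, p < hp.length → (hp ++ [x]).getD p 0 = hp.getD p 0 := fun p hp2 =>
    List.getD_append _ _ _ _ hp2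
  have hgetx : (hp ++ [x]).getD hp.length 0 = x := by
    rw [List.getD_append_right _ _ _ _ (le_refl _)]
    simp
  have hdrop : (hp ++ [x]).drop 1 = hp.drop 1 ++ [x] := by
    rw [List.drop_append_of_le_length hl]
  have hmin : ∀ p, 1 ≤ p → p < (hp ++ [x]).length → p ≠ hp.length →
      (hp ++ [x]).getD 1 0 ≤ (hp ++ [x]).getD p 0 := by
    intro p hp1 hp2 hpne
    have hplt : p < hp.length := by omega
    have hl2 : 2 ≤ hp.length := by omega
    rw [hgetin p hplt, hgetin 1 (by omega)]
    exact hinv _ (pv_mem_drop_of_getD hp p hp1 hplt)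
  obtain ⟨l1, l2, l3⟩ := pv_floatUp_spec ((hp ++ [x]).length - 1) (hp ++ [x])
    (by omega) (by omega) (by rw [hidx]; exact hmin)
  unfold pvHeapPush
  rw [hidx] at l1 l2 l3 ⊢
  rw [hgetx] at l3
  rw [hdrop] at l2
  refine ⟨by rw [l1, hlen'], l2, ?_⟩
  intro y hy
  rw [l3]
  rcases List.mem_append.mp (l2.subset hy) with hmem | hmem
  · have hl2 : 2 ≤ hp.length := by
      by_contra hcon
      have h1 : hp.length = 1 := by omega
      have h2 : hp.drop 1 = [] := by
        apply List.eq_nil_of_length_eq_zero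
        simp [h1]
      simp [h2] at hmem
    have := hinv y hmem
    rw [hgetin 1 (by omega)]
    omega
  · simp at hmem
    subst hmem
    exact min_le_right _ _

lemma pv_foldPush (P : List Int) : ∀ hp : List Int, 1 ≤ hp.length → pvRootInv hp →
    (P.foldl pvHeapPush hp).length = hp.length + P.length ∧
    ((P.foldl pvHeapPush hp).drop 1).Perm (hp.drop 1 ++ P) ∧
    pvRootInv (P.foldl pvHeapPush hp) := by
  induction P with
  | nil => intro hp h1 h2; exact ⟨by simp, by simp, h2⟩
  | cons d P' ih =>
    intro hp h1 h2
    obtain ⟨p1, p2, p3⟩ := pv_push_spec hp d h1 h2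
    obtain ⟨q1, q2, q3⟩ := ih (pvHeapPush hp d) (by omega) p3
    refine ⟨by simp [List.foldl_cons, q1, p1]; omega, ?_, by simpa using q3⟩
    simp only [List.foldl_cons]
    refine q2.trans ?_
    have : (hp.drop 1 ++ [d]) ++ P' = hp.drop 1 ++ (d :: P') := by simp
    rw [← this]
    exact p2.append_right P'

-- ---------- loop lemmas (A side) ----------

lemma pv_innerA_none_iff (a : List Int) (i : Int) (js : List Int) (hp : List Int) :
    pvInnerA a i js hp = none ↔ ∃ j ∈ js, PySem.List.pyGetD a i 0 - PySem.List.pyGetD a j 0 = 1 := by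
  induction js generalizing hp with
  | nil => simp [pvInnerA]
  | cons j rest ih =>
    simp only [pvInnerA, List.exists_mem_cons_iff]
    split_ifs with hgt heq
    · rw [ih]
      constructor
      · exact fun h => Or.inr h
      · rintro (h | h)
        · omega
        · exact h
    · simp [heq]
    · rw [ih]
      constructor
      · exact fun h => Or.inr h
      · rintro (h | h)
        · exact absurd h heq
        · exact h

lemma pv_innerA_some (a : List Int) (i : Int) (js : List Int) (hp : List Int)
    (hno : ∀ j ∈ js, PySem.List.pyGetD a i 0 - PySem.List.pyGetD a j 0 ≠ 1) :
    pvInnerA a i js hp = some ((js.filterMap (fun j =>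
      if 1 < PySem.List.pyGetD a i 0 - PySem.List.pyGetD a j 0
      then some (PySem.List.pyGetD a i 0 - PySem.List.pyGetD a j 0) else none)).foldl pvHeapPush hp) := by
  induction js generalizing hp with
  | nil => simp [pvInnerA]
  | cons j rest ih =>
    simp only [pvInnerA, List.filterMap_cons]
    split_ifs with hgt heq
    · rw [ih _ (fun j hj => hno j (List.mem_cons_of_mem _ hj))]
      simp
    · exact absurd heq (hno j (List.mem_cons_self))
    · rw [ih _ (fun j hj => hno j (List.mem_cons_of_mem _ hj))]

-- the multiset of values A pushes: every a[i]-a[j] > 1 the two loops reach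
def pvP (a : List Int) : List Int :=
  (PySem.List.pyRange 0 ((a.length : Int) - 1) 1).flatMap (fun i =>
    (PySem.List.pyRange i (a.length : Int) 1).filterMap (fun j =>
      if 1 < PySem.List.pyGetD a i 0 - PySem.List.pyGetD a j 0
      then some (PySem.List.pyGetD a i 0 - PySem.List.pyGetD a j 0) else none))

lemma pv_outerA_none_iff (a : List Int) (is : List Int) (hp : List Int) :
    pvOuterA a is hp = none ↔ ∃ i ∈ is, ∃ j ∈ PySem.List.pyRange i (a.length : Int) 1,
      PySem.List.pyGetD a i 0 - PySem.List.pyGetD a j 0 = 1 := by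
  induction is generalizing hp with
  | nil => simp [pvOuterA]
  | cons i rest ih =>
    simp only [pvOuterA, List.exists_mem_cons_iff]
    cases hinner : pvInnerA a i (PySem.List.pyRange i (a.length : Int) 1) hp with
    | none =>
      simp only [true_iff]
      exact Or.inl ((pv_innerA_none_iff a i _ hp).mp hinner)
    | some hp' =>
      rw [ih]
      constructor
      · exact fun h => Or.inr h
      · rintro (h | h)
        · rw [(pv_innerA_none_iff a i _ hp).mpr h] at hinner
          exact absurd hinner (by simp)
        · exact h

lemma pv_outerA_some (a : List Int) (is : List Int) (hp : List Int)
    (hno : ∀ i ∈ is, ∀ j ∈ PySem.List.pyRange i (a.length : Int) 1,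
      PySem.List.pyGetD a i 0 - PySem.List.pyGetD a j 0 ≠ 1) :
    pvOuterA a is hp = some ((is.flatMap (fun i =>
      (PySem.List.pyRange i (a.length : Int) 1).filterMap (fun j =>
        if 1 < PySem.List.pyGetD a i 0 - PySem.List.pyGetD a j 0
        then some (PySem.List.pyGetD a i 0 - PySem.List.pyGetD a j 0) else none))).foldl pvHeapPush hp) := by
  induction is generalizing hp with
  | nil => simp [pvOuterA]
  | cons i rest ih =>
    simp only [pvOuterA, List.flatMap_cons, List.foldl_append]
    rw [pv_innerA_some a i _ hp (fun j hj h => hno i (List.mem_cons_self) j hj h)]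
    exact ih _ (fun i' hi' => hno i' (List.mem_cons_of_mem _ hi'))

lemma pv_getD_bridge (a : List Int) (i : Int) (h0 : 0 ≤ i) (_hi : i < (a.length : Int)) :
    PySem.List.pyGetD a i 0 = a.getD i.toNat 0 := by
  conv_lhs => rw [show i = ((i.toNat : Nat) : Int) by omega]
  rw [PySem.List.pyGetD_natCast]

lemma pv_one_iff (a : List Int) :
    (∃ i ∈ PySem.List.pyRange 0 ((a.length : Int) - 1) 1,
      ∃ j ∈ PySem.List.pyRange i (a.length : Int) 1,
        PySem.List.pyGetD a i 0 - PySem.List.pyGetD a j 0 = 1) ↔ pvLoss a 1 := by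
  constructor
  · rintro ⟨i, hi, j, hj, heq⟩
    rw [PySem.List.mem_pyRange_one] at hi hj
    have hne : i ≠ j := by
      intro h
      rw [h] at heq
      omega
    rw [pv_getD_bridge a i (by omega) (by omega), pv_getD_bridge a j (by omega) (by omega)] at heq
    exact ⟨i.toNat, j.toNat, by omega, by omega, by omega, by omega⟩
  · rintro ⟨i, j, hij, hj, _, heq⟩
    refine ⟨(i : Int), ?_, (j : Int), ?_, ?_⟩
    · rw [PySem.List.mem_pyRange_one]
      constructor
      · omega
      · omega
    · rw [PySem.List.mem_pyRange_one]
      constructor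
      · omega
      · omega
    · simp only [PySem.List.pyGetD_natCast]
      omega

lemma pv_P_mem (a : List Int) (d : Int) : d ∈ pvP a ↔ pvLoss a d ∧ 1 < d := by
  unfold pvP
  simp only [List.mem_flatMap, List.mem_filterMap]
  constructor
  · rintro ⟨i, hi, j, hj, hif⟩
    rw [PySem.List.mem_pyRange_one] at hi hj
    split_ifs at hif with hgt
    · have hd : PySem.List.pyGetD a i 0 - PySem.List.pyGetD a j 0 = d := by
        simpa using hif
      have hne : i ≠ j := by
        intro h
        rw [h] at hgt
        omega
      have hdpos : 1 < d := by omega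
      rw [pv_getD_bridge a i (by omega) (by omega), pv_getD_bridge a j (by omega) (by omega)] at hd
      exact ⟨⟨i.toNat, j.toNat, by omega, by omega, by omega, by omega⟩, hdpos⟩
  · rintro ⟨⟨i, j, hij, hj, h1, heq⟩, hgt⟩
    refine ⟨(i : Int), ?_, (j : Int), ?_, ?_⟩
    · rw [PySem.List.mem_pyRange_one]
      constructor
      · omega
      · omega
    · rw [PySem.List.mem_pyRange_one]
      constructor
      · omega
      · omega
    · simp only [PySem.List.pyGetD_natCast]
      rw [if_pos (by omega)]
      congr 1
      omega

lemma pv_A_min (a : List Int) : pvMin a (find_minimum_loss a) := by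
  unfold find_minimum_loss
  by_cases hone : pvLoss a 1
  · rw [(pv_outerA_none_iff a _ [0]).mpr ((pv_one_iff a).mpr hone)]
    show pvMin a 1
    right
    refine ⟨hone, fun d hd => ?_⟩
    obtain ⟨_, _, _, _, h1, _⟩ := hd
    exact h1
  · have hno : ∀ i ∈ PySem.List.pyRange 0 ((a.length : Int) - 1) 1,
        ∀ j ∈ PySem.List.pyRange i (a.length : Int) 1,
        PySem.List.pyGetD a i 0 - PySem.List.pyGetD a j 0 ≠ 1 := by
      intro i hi j hj heq
      exact hone ((pv_one_iff a).mp ⟨i, hi, j, hj, heq⟩)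
    rw [pv_outerA_some a _ [0] hno]
    have hroot : pvRootInv [0] := by
      intro y hy
      simp at hy
    obtain ⟨f1, f2, f3⟩ := pv_foldPush (pvP a) [0] (by simp) hroot
    have f2' : ((List.foldl pvHeapPush [0] (pvP a)).drop 1).Perm (pvP a) := by simpa using f2
    set hF := List.foldl pvHeapPush [0] (pvP a) with hFdef
    show pvMin a (match pvHeapPeek hF with
      | some v => if v ≠ 0 then v else 0
      | none => 0)
    cases hP : pvP a with
    | nil =>
      have hlen : hF.length = 1 := by
        rw [hP] at f1
        simpa using f1
      have hpeek : pvHeapPeek hF = none := by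
        unfold pvHeapPeek
        rw [if_neg (by omega)]
      rw [hpeek]
      show pvMin a 0
      left
      refine ⟨?_, rfl⟩
      rintro ⟨d, hd⟩
      by_cases hd1 : d = 1
      · rw [hd1] at hd
        exact hone hd
      · have : d ∈ pvP a := (pv_P_mem a d).mpr ⟨hd, by rcases hd with ⟨_, _, _, _, h1, _⟩; omega⟩
        rw [hP] at this
        simp at this
    | cons c P' =>
      have hlen : 2 ≤ hF.length := by
        rw [hP] at f1
        simp at f1
        omega
      have hpeek : pvHeapPeek hF = some (hF.getD 1 0) := by
        unfold pvHeapPeek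
        rw [if_pos (by omega)]
      rw [hpeek]
      show pvMin a (if hF.getD 1 0 ≠ 0 then hF.getD 1 0 else 0)
      have hrootmem : hF.getD 1 0 ∈ pvP a :=
        f2'.subset (pv_mem_drop_of_getD hF 1 (by omega) (by omega))
      have hrootloss := (pv_P_mem a _).mp hrootmem
      rw [if_pos (show hF.getD 1 0 ≠ 0 by
        have := hrootloss.2
        omega)]
      right
      refine ⟨hrootloss.1, ?_⟩
      intro d hd
      by_cases hd1 : d = 1
      · rw [hd1] at hd
        exact absurd hd hone
      · have hdP : d ∈ pvP a := (pv_P_mem a d).mpr ⟨hd, by rcases hd with ⟨_, _, _, _, h1, _⟩; omega⟩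
        exact f3 d (f2'.symm.subset hdP)

-- ---------- sort lemmas (B side) ----------

-- the lexicographic order B's stable sort by value produces on (index, value) pairs
def pvS (p q : Int × Int) : Prop := p.2 < q.2 ∨ (p.2 = q.2 ∧ p.1 < q.1)

def pvPairs (a : List Int) : List (Int × Int) :=
  PySem.List.sorted (PySem.List.enumerate a) (fun p => p.2) false

lemma pv_insertBy_pairwise (x : Int × Int) (acc : List (Int × Int))
    (hacc : acc.Pairwise pvS) (hlt : ∀ y ∈ acc, y.1 < x.1) :
    (PySem.List.insertBy (fun a b => decide (a.2 < b.2)) x acc).Pairwise pvS := by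
  induction acc with
  | nil => simp [PySem.List.insertBy]
  | cons y t ih =>
    simp only [PySem.List.insertBy]
    by_cases hb : y.2 > x.2
    · rw [if_pos (by simpa using hb)]
      refine List.Pairwise.cons ?_ hacc
      intro z hz
      rcases List.mem_cons.mp hz with hz | hz
      · subst hz
        exact Or.inl hb
      · have := List.rel_of_pairwise_cons hacc hz
        unfold pvS at this ⊢
        omega
    · rw [if_neg (by simpa using hb)]
      refine List.Pairwise.cons ?_ (ih hacc.tail (fun z hz => hlt z (List.mem_cons_of_mem _ hz)))
      intro z hz
      rcases (PySem.List.mem_insertBy _ _ _ _).mp hz with hz | hz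
      · subst hz
        have := hlt y List.mem_cons_self
        unfold pvS
        omega
      · exact List.rel_of_pairwise_cons hacc hz

lemma pv_enum_fold_pairwise (l : List Int) : ∀ (s : Int) (acc : List (Int × Int)),
    acc.Pairwise pvS → (∀ y ∈ acc, y.1 < s) →
    ((PySem.List.enumerate l s).foldl
      (fun acc x => PySem.List.insertBy (fun a b => decide (a.2 < b.2)) x acc) acc).Pairwise pvS := by
  induction l with
  | nil => intro s acc hacc _; simpa [PySem.List.enumerate] using hacc
  | cons v l' ih =>
    intro s acc hacc hlt
    rw [PySem.List.enumerate_cons, List.foldl_cons]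
    refine ih (s + 1) _ (pv_insertBy_pairwise (s, v) acc hacc hlt) ?_
    intro y hy
    rcases (PySem.List.mem_insertBy _ _ _ _).mp hy with hy | hy
    · subst hy
      simp
    · have := hlt y hy
      omega

lemma pv_pairs_pairwise (a : List Int) : (pvPairs a).Pairwise pvS := by
  unfold pvPairs
  rw [PySem.List.sorted_eq_foldl_insertBy]
  exact pv_enum_fold_pairwise a 0 [] List.Pairwise.nil (by simp)

-- the candidate values B's adjacent scan considers
def pvC (a : List Int) : List Int :=
  (PySem.List.pyRange 1 ((pvPairs a).length : Int) 1).filterMap (fun k =>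
    if (PySem.List.pyGetD (pvPairs a) k ((0 : Int), (0 : Int))).2 >
         (PySem.List.pyGetD (pvPairs a) (k - 1) ((0 : Int), (0 : Int))).2 ∧
       (PySem.List.pyGetD (pvPairs a) k ((0 : Int), (0 : Int))).1 <
         (PySem.List.pyGetD (pvPairs a) (k - 1) ((0 : Int), (0 : Int))).1
    then some ((PySem.List.pyGetD (pvPairs a) k ((0 : Int), (0 : Int))).2 -
         (PySem.List.pyGetD (pvPairs a) (k - 1) ((0 : Int), (0 : Int))).2) else none)

def pvComb (b d : Int) : Int := if b = 0 ∨ d < b then d else b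

lemma pv_alt_eq_fold (a : List Int) : find_minimum_loss_alt a = (pvC a).foldl pvComb 0 := by
  have halt : find_minimum_loss_alt a = (PySem.List.pyRange 1 ((pvPairs a).length : Int) 1).foldl
      (fun best k =>
        let p1 := PySem.List.pyGetD (pvPairs a) (k - 1) ((0 : Int), (0 : Int))
        let p2 := PySem.List.pyGetD (pvPairs a) k ((0 : Int), (0 : Int))
        if p2.2 > p1.2 ∧ p2.1 < p1.1 then
          if best = 0 ∨ p2.2 - p1.2 < best then p2.2 - p1.2 else best
        else best) 0 := rfl
  rw [halt]
  unfold pvC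
  rw [List.foldl_filterMap]
  apply PySem.List.foldl_congr_mem
  intro acc k _
  simp only [pvComb]
  split_ifs <;> simp [*]

lemma pv_comb_min (cs : List Int) (hpos : ∀ c ∈ cs, 1 ≤ c) : ∀ b : Int, 1 ≤ b →
    cs.foldl pvComb b ∈ b :: cs ∧ ∀ c ∈ b :: cs, cs.foldl pvComb b ≤ c := by
  induction cs with
  | nil =>
    intro b hb
    simp
  | cons c t ih =>
    intro b hb
    rw [List.foldl_cons]
    have hc1 : 1 ≤ c := hpos c List.mem_cons_self
    have hcomb : pvComb b c = b ∨ pvComb b c = c := by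
      unfold pvComb
      split_ifs <;> simp
    have hcomb1 : 1 ≤ pvComb b c := by rcases hcomb with h | h <;> omega
    have hcomble : pvComb b c ≤ b ∧ pvComb b c ≤ c := by
      unfold pvComb
      split_ifs with h
      · rcases h with h | h <;> omega
      · omega
    obtain ⟨m1, m2⟩ := ih (fun z hz => hpos z (List.mem_cons_of_mem _ hz)) (pvComb b c) hcomb1
    constructor
    · rcases List.mem_cons.mp m1 with h | h
      · rw [h]
        rcases hcomb with h' | h'
        · rw [h']; exact List.mem_cons_self
        · rw [h']; exact List.mem_cons_of_mem _ List.mem_cons_self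
      · exact List.mem_cons_of_mem _ (List.mem_cons_of_mem _ h)
    · intro z hz
      have hle : t.foldl pvComb (pvComb b c) ≤ pvComb b c := m2 _ List.mem_cons_self
      rcases List.mem_cons.mp hz with h | h
      · omega
      · rcases List.mem_cons.mp h with h' | h'
        · omega
        · exact m2 _ (List.mem_cons_of_mem _ h')

lemma pv_mem_pairs (a : List Int) (p : Int × Int) (hp : p ∈ pvPairs a) :
    ∃ n : Nat, n < a.length ∧ p = ((n : Int), a.getD n 0) := by
  have hp' : p ∈ PySem.List.sorted (PySem.List.enumerate a 0) (fun q => q.2) false := hp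
  have hmem : p ∈ PySem.List.enumerate a 0 :=
    (PySem.List.sorted_perm (PySem.List.enumerate a 0) (fun q => q.2) false).mem_iff.mp hp'
  obtain ⟨k, hk, hkp⟩ := (PySem.List.mem_enumerate_iff _ _ _).mp hmem
  refine ⟨k, hk, ?_⟩
  rw [hkp, List.getD_eq_getElem _ _ hk]
  simp

lemma pv_pairs_getD (a : List Int) (k : Nat) (hk : k < (pvPairs a).length) :
    PySem.List.pyGetD (pvPairs a) (k : Int) ((0 : Int), (0 : Int)) = (pvPairs a)[k] := by
  rw [PySem.List.pyGetD_natCast, List.getD_eq_getElem _ _ hk]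

lemma pv_cand_mem (a : List Int) (k : Nat) (h1 : 1 ≤ k) (hk : k < (pvPairs a).length)
    (hk1 : k - 1 < (pvPairs a).length)
    (hv : ((pvPairs a)[k - 1]'hk1).2 < ((pvPairs a)[k]'hk).2)
    (hi : ((pvPairs a)[k]'hk).1 < ((pvPairs a)[k - 1]'hk1).1) :
    (((pvPairs a)[k]'hk).2 - ((pvPairs a)[k - 1]'hk1).2) ∈ pvC a := by
  unfold pvC
  rw [List.mem_filterMap]
  refine ⟨(k : Int), ?_, ?_⟩
  · rw [PySem.List.mem_pyRange_one]
    constructor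
    · omega
    · omega
  · have hcast : (k : Int) - 1 = ((k - 1 : Nat) : Int) := by omega
    simp only [hcast, pv_pairs_getD a k hk, pv_pairs_getD a (k - 1) hk1]
    rw [if_pos ⟨hv, hi⟩]

lemma pv_C_loss (a : List Int) (c : Int) (hc : c ∈ pvC a) : pvLoss a c := by
  unfold pvC at hc
  rw [List.mem_filterMap] at hc
  obtain ⟨k, hk, hf⟩ := hc
  rw [PySem.List.mem_pyRange_one] at hk
  split_ifs at hf with hcond
  · simp only [Option.some.injEq] at hf
    have hlen : k.toNat < (pvPairs a).length := by omega
    have hlen1 : k.toNat - 1 < (pvPairs a).length := by omega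
    have e2 : PySem.List.pyGetD (pvPairs a) k ((0 : Int), (0 : Int)) = (pvPairs a)[k.toNat] := by
      conv_lhs => rw [show k = ((k.toNat : Nat) : Int) by omega]
      exact pv_pairs_getD a k.toNat hlen
    have e1 : PySem.List.pyGetD (pvPairs a) (k - 1) ((0 : Int), (0 : Int)) =
        (pvPairs a)[k.toNat - 1] := by
      conv_lhs => rw [show k - 1 = ((k.toNat - 1 : Nat) : Int) by omega]
      exact pv_pairs_getD a (k.toNat - 1) hlen1
    rw [e1, e2] at hf hcond
    obtain ⟨n2, hn2, hp2⟩ := pv_mem_pairs a _ (List.getElem_mem hlen)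
    obtain ⟨n1, hn1, hp1⟩ := pv_mem_pairs a _ (List.getElem_mem hlen1)
    rw [hp1, hp2] at hf hcond
    simp only at hf hcond
    exact ⟨n2, n1, by omega, hn1, by omega, by omega⟩

lemma pv_adj (a : List Int) : ∀ (gap s t : Nat), t - s = gap → s < t →
    ∀ (hs : s < (pvPairs a).length) (ht : t < (pvPairs a).length),
    ((pvPairs a)[s]'hs).2 < ((pvPairs a)[t]'ht).2 →
    ((pvPairs a)[t]'ht).1 < ((pvPairs a)[s]'hs).1 →
    ∃ c ∈ pvC a, c ≤ ((pvPairs a)[t]'ht).2 - ((pvPairs a)[s]'hs).2 := by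
  intro gap
  induction gap using Nat.strong_induction_on with
  | _ gap ih =>
    intro s t hgap hst hs ht hv hi
    have hpw := List.pairwise_iff_getElem.mp (pv_pairs_pairwise a)
    by_cases hadj : t = s + 1
    · subst hadj
      have := pv_cand_mem a (s + 1) (by omega) ht (by simpa using hs)
        (by simpa using hv) (by simpa using hi)
      exact ⟨_, by simpa using this, by simp⟩
    · have hmt : s + 1 < t := by omega
      have hm : s + 1 < (pvPairs a).length := by omega
      have hsm := hpw s (s + 1) hs hm (by omega)
      have hmtp := hpw (s + 1) t hm ht (by omega)
      by_cases h1 : ((pvPairs a)[s + 1]'hm).2 = ((pvPairs a)[s]'hs).2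
      · have hidx : ((pvPairs a)[s]'hs).1 < ((pvPairs a)[s + 1]'hm).1 := by
          rcases hsm with h | ⟨_, h⟩
          · omega
          · exact h
        obtain ⟨c, hc, hle⟩ := ih (t - (s + 1)) (by omega) (s + 1) t rfl (by omega) hm ht
          (by omega) (by omega)
        exact ⟨c, hc, by omega⟩
      · have hvm : ((pvPairs a)[s]'hs).2 < ((pvPairs a)[s + 1]'hm).2 := by
          rcases hsm with h | ⟨h, _⟩
          · exact h
          · omega
        by_cases h2 : ((pvPairs a)[s + 1]'hm).1 < ((pvPairs a)[s]'hs).1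
        · have hmem := pv_cand_mem a (s + 1) (by omega) hm (by simpa using hs)
            (by simpa using hvm) (by simpa using h2)
          have hle2 : ((pvPairs a)[s + 1]'hm).2 ≤ ((pvPairs a)[t]'ht).2 := by
            rcases hmtp with h | ⟨h, _⟩ <;> omega
          refine ⟨_, by simpa using hmem, ?_⟩
          omega
        · have hvt : ((pvPairs a)[s + 1]'hm).2 < ((pvPairs a)[t]'ht).2 := by
            rcases hmtp with h | ⟨h, hidx⟩
            · exact h
            · omega
          obtain ⟨c, hc, hle⟩ := ih (t - (s + 1)) (by omega) (s + 1) t rfl (by omega) hm ht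
            hvt (by omega)
          exact ⟨c, hc, by omega⟩

lemma pv_loss_cand (a : List Int) (d : Int) (hd : pvLoss a d) : ∃ c ∈ pvC a, c ≤ d := by
  obtain ⟨i, j, hij, hj, h1, heq⟩ := hd
  have hperm := (PySem.List.sorted_perm (PySem.List.enumerate a 0) (fun q => q.2) false).symm
  have hjm : (((j : Nat) : Int), a.getD j 0) ∈ pvPairs a := by
    show (((j : Nat) : Int), a.getD j 0) ∈ PySem.List.sorted (PySem.List.enumerate a 0) (fun q => q.2) false
    apply hperm.subset
    rw [PySem.List.mem_enumerate_iff]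
    exact ⟨j, hj, by rw [List.getD_eq_getElem _ _ hj]; simp⟩
  have him : (((i : Nat) : Int), a.getD i 0) ∈ pvPairs a := by
    show (((i : Nat) : Int), a.getD i 0) ∈ PySem.List.sorted (PySem.List.enumerate a 0) (fun q => q.2) false
    apply hperm.subset
    rw [PySem.List.mem_enumerate_iff]
    exact ⟨i, by omega, by rw [List.getD_eq_getElem _ _ (by omega)]; simp⟩
  obtain ⟨s, hsl, hse⟩ := List.mem_iff_getElem.mp hjm
  obtain ⟨t, htl, hte⟩ := List.mem_iff_getElem.mp him
  have hvst : ((pvPairs a)[s]'hsl).2 < ((pvPairs a)[t]'htl).2 := by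
    rw [hse, hte]
    show a.getD j 0 < a.getD i 0
    omega
  have hist : ((pvPairs a)[t]'htl).1 < ((pvPairs a)[s]'hsl).1 := by
    rw [hse, hte]
    show ((i : Nat) : Int) < ((j : Nat) : Int)
    omega
  have hpw := List.pairwise_iff_getElem.mp (pv_pairs_pairwise a)
  have hst : s < t := by
    rcases Nat.lt_trichotomy s t with h | h | h
    · exact h
    · exfalso
      subst h
      have heq2 := hse.symm.trans hte
      have : ((j : Nat) : Int) = ((i : Nat) : Int) := by
        have := congrArg Prod.fst heq2
        simpa using this
      omega
    · exfalso
      have := hpw t s htl hsl h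
      unfold pvS at this
      omega
  obtain ⟨c, hc, hle⟩ := pv_adj a (t - s) s t rfl hst hsl htl hvst hist
  refine ⟨c, hc, ?_⟩
  rw [hse, hte] at hle
  have hle2 : c ≤ a.getD i 0 - a.getD j 0 := hle
  omega

lemma pv_B_min (a : List Int) : pvMin a (find_minimum_loss_alt a) := by
  rw [pv_alt_eq_fold]
  have hpos : ∀ c ∈ pvC a, 1 ≤ c := by
    intro c hc
    obtain ⟨_, _, _, _, h1, _⟩ := pv_C_loss a c hc
    exact h1
  cases hC : pvC a with
  | nil =>
    left
    refine ⟨?_, rfl⟩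
    rintro ⟨d, hd⟩
    obtain ⟨c, hc, _⟩ := pv_loss_cand a d hd
    rw [hC] at hc
    simp at hc
  | cons c t =>
    rw [List.foldl_cons]
    have hc0 : pvComb 0 c = c := by
      unfold pvComb
      rw [if_pos (Or.inl rfl)]
    rw [hc0]
    have hpos' : ∀ z ∈ t, 1 ≤ z := by
      intro z hz
      exact hpos z (by rw [hC]; exact List.mem_cons_of_mem _ hz)
    obtain ⟨m1, m2⟩ := pv_comb_min t hpos' c (hpos c (by rw [hC]; exact List.mem_cons_self))
    right
    constructor
    · exact pv_C_loss a _ (by rw [hC]; exact m1)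
    · intro d hd
      obtain ⟨c', hc', hle⟩ := pv_loss_cand a d hd
      rw [hC] at hc'
      exact le_trans (m2 c' hc') hle

-- ===== VERDICT (by name: the statement is the Claim_ definition above) =====
theorem find_minimum_loss_spec : Claim_equal_find_minimum_loss := by
  intro a _
  unfold Spec_find_minimum_loss
  exact pvMin_unique (pv_A_min a) (pv_B_min a)
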